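-- pv_equiv track=rewrite | github.com/ai-janitor/memory-cli | src/memory_cli/search/heavy/haiku_rerank_by_neuron_ids.py | _apply_defensive_reorder
-- ===== SOURCE A (Python) =====
-- from typing import Any, Dict, List, Set
--
-- def _apply_defensive_reorder(
--     haiku_ids: List[int],
--     candidates: List[Dict[str, Any]],
-- ) -> List[int]:
--     """Reconcile Haiku's ID list with actual candidate IDs.
--
--     Defensive rules:
--     1. Build set of valid candidate IDs from candidates list
--     2. Walk haiku_ids in order:
--        a. Skip if ID not in valid set (Haiku hallucinated an ID)
--        b. Skip if ID already seen (Haiku duplicated an ID)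
--        c. Otherwise, add to result list and mark as seen
--     3. After processing haiku_ids, find any candidate IDs NOT in result
--        - Append them in their original order (from candidates list)
--        - This ensures no candidates are lost
--
--     This guarantees:
--     - Every candidate appears exactly once in the output
--     - Haiku's ordering is respected for IDs it returned correctly
--     - Unknown/duplicate IDs from Haiku are silently dropped
--     - Missing IDs appear at the end in original order
--
--     Args:
--         haiku_ids: Ordered ID list from Haiku (may be imperfect).
--         candidates: Original candidate list from light search.
--
--     Returns:
--         Fully reconciled ordered list of neuron IDs.
--     """
--     # Build set of valid candidate IDs
--     valid_ids = {c["id"] for c in candidates}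
--     candidate_order = [c["id"] for c in candidates]
--
--     result: List[int] = []
--     seen: Set[int] = set()
--
--     # Walk haiku_ids: skip unknown and duplicates
--     for hid in haiku_ids:
--         if hid not in valid_ids:
--             continue
--         if hid in seen:
--             continue
--         result.append(hid)
--         seen.add(hid)
--
--     # Append any candidates missing from Haiku's list in original order
--     for cid in candidate_order:
--         if cid not in seen:
--             result.append(cid)
--             seen.add(cid)
--
--     return result
-- ===== SOURCE B (Python) =====
-- from typing import Any, Dict, List
--
--
-- def _apply_defensive_reorder(
--     haiku_ids: List[int],
--     candidates: List[Dict[str, Any]],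
-- ) -> List[int]:
--     """Rank-table formulation: give every distinct candidate id a sort key --
--     its Haiku rank if Haiku returned it, otherwise len(haiku_ids) plus its
--     first-occurrence rank among the candidates -- and sort the distinct
--     candidate ids by that key."""
--     cand_rank: Dict[int, int] = {}
--     for c in candidates:
--         cand_rank.setdefault(c["id"], len(cand_rank))
--
--     haiku_rank: Dict[int, int] = {}
--     for h in haiku_ids:
--         if h in cand_rank and h not in haiku_rank:
--             haiku_rank[h] = len(haiku_rank)
--
--     n = len(haiku_ids)
--     return sorted(
--         cand_rank,
--         key=lambda x: haiku_rank[x] if x in haiku_rank else n + cand_rank[x],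
--     )
-- ===== Notes on version B (the rewrite author's own statement) =====
-- stated objective: alternative
-- what changed: Replaced A's two sequential append passes (haiku ids then missing candidates, each deduped with a seen-set) by a rank-table-plus-sort: one dict gives each distinct candidate id its first-occurrence rank, another gives valid haiku ids their haiku rank, and the distinct candidate ids are sorted by the integer key haiku_rank or len(haiku_ids)+candidate_rank.
import Mathlib
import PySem

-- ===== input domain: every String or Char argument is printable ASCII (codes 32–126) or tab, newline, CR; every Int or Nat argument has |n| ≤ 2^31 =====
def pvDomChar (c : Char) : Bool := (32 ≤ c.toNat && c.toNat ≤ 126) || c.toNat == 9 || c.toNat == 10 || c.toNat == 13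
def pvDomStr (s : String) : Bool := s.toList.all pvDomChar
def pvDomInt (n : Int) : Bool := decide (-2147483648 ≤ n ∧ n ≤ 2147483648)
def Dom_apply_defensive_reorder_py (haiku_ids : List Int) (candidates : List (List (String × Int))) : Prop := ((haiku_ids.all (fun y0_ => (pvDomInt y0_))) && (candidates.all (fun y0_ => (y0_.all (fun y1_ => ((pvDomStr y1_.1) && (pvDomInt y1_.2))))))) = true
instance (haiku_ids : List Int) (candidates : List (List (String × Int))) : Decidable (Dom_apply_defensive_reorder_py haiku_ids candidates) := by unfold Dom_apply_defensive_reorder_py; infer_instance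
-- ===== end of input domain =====

-- B replaces A's two append passes by a rank-table-plus-sort: each distinct candidate id gets
-- an integer sort key (its haiku rank, or len(haiku_ids) + its candidate first-occurrence rank)
-- and the distinct candidate ids are sorted by that key (alternative decomposition, same result).

-- ===== PORT A =====
-- c["id"] (first match in the association list); Pre_ ensures the key "id" is present,
-- so the .getD 0 default is never used
def pvGetId (c : List (String × Int)) : Int := ((c.lookup "id")).getD 0

def apply_defensive_reorder_py (haiku_ids : List Int) (candidates : List (List (String × Int))) : List Int :=
  let valid_ids : PySem.Set Int := PySem.Set.ofList (candidates.map pvGetId)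
  let candidate_order : List Int := candidates.map pvGetId
  let st1 := haiku_ids.foldl (fun (st : List Int × PySem.Set Int) hid =>
      if ¬ (PySem.Set.contains valid_ids hid = true) then st
      else if PySem.Set.contains st.2 hid = true then st
      else (st.1 ++ [hid], PySem.Set.add st.2 hid)) ([], PySem.Set.empty)
  let st2 := candidate_order.foldl (fun (st : List Int × PySem.Set Int) cid =>
      if PySem.Set.contains st.2 cid = true then st
      else (st.1 ++ [cid], PySem.Set.add st.2 cid)) st1
  st2.1

-- ===== PORT B =====
def apply_defensive_reorder_py_alt (haiku_ids : List Int) (candidates : List (List (String × Int))) : List Int :=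
  let cand_rank : PySem.Dict Int Int :=
    candidates.foldl (fun d c => d.setdefault (pvGetId c) (d.size : Int)) PySem.Dict.empty
  let haiku_rank : PySem.Dict Int Int :=
    haiku_ids.foldl (fun r h =>
      if cand_rank.contains h && !(r.contains h) then r.insert h (r.size : Int) else r)
      PySem.Dict.empty
  let n : Int := (haiku_ids.length : Int)
  PySem.List.sorted cand_rank.keys
    (fun x => if haiku_rank.contains x = true then haiku_rank.getD x 0
              else n + cand_rank.getD x 0) false

-- ===== PRECONDITION & SPEC =====
-- Pre_ excludes candidate dicts without the key "id", on which both Pythons raise KeyError.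
def Pre_apply_defensive_reorder_py (haiku_ids : List Int) (candidates : List (List (String × Int))) : Prop :=
  ∀ c ∈ candidates, (c.lookup "id").isSome = true
instance (haiku_ids : List Int) (candidates : List (List (String × Int))) : Decidable (Pre_apply_defensive_reorder_py haiku_ids candidates) := by unfold Pre_apply_defensive_reorder_py; infer_instance

def pvWitness_apply_defensive_reorder_py : List Int × (List (List (String × Int))) :=
  ([3, 7, 3, 9], [[("id", 2)], [("id", 7)], [("id", 2)], [("id", 5)]])

def Spec_apply_defensive_reorder_py (haiku_ids : List Int) (candidates : List (List (String × Int))) (out : List Int) : Prop := out = apply_defensive_reorder_py_alt haiku_ids candidates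
instance (haiku_ids : List Int) (candidates : List (List (String × Int))) (out : List Int) : Decidable (Spec_apply_defensive_reorder_py haiku_ids candidates out) := by unfold Spec_apply_defensive_reorder_py; infer_instance

-- ===== CLAIM (what is proved, stated in full; the proofs are below) =====
def Claim_equal_apply_defensive_reorder_py : Prop := ∀ (haiku_ids : List Int) (candidates : List (List (String × Int))), Dom_apply_defensive_reorder_py haiku_ids candidates → Pre_apply_defensive_reorder_py haiku_ids candidates → Spec_apply_defensive_reorder_py haiku_ids candidates (apply_defensive_reorder_py haiku_ids candidates)

-- ===== LEMMAS AND PROOFS =====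

-- In a duplicate-free list, earlier elements have smaller indices.
theorem pv_idxOf_pairwise (l : List Int) (h : l.Nodup) :
    l.Pairwise (fun a b => l.idxOf a < l.idxOf b) := by
  rw [List.pairwise_iff_getElem]
  intro i j hi hj hij
  rw [h.idxOf_getElem i hi, h.idxOf_getElem j hj]
  exact hij

-- A's first loop: the result list and the seen set stay equal, and together they are the
-- ordered-dedup (Set.update) of the haiku ids that pass the validity test.
theorem pv_pair1 (v : PySem.Set Int) (l : List Int) (s : PySem.Set Int) :
    l.foldl (fun (st : List Int × PySem.Set Int) hid =>
        if ¬ (PySem.Set.contains v hid = true) then st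
        else if PySem.Set.contains st.2 hid = true then st
        else (st.1 ++ [hid], PySem.Set.add st.2 hid)) (s, s)
      = (PySem.Set.update s (l.filter (fun x => PySem.Set.contains v x)),
         PySem.Set.update s (l.filter (fun x => PySem.Set.contains v x))) := by
  induction l generalizing s with
  | nil => rfl
  | cons x tl ih =>
    simp only [List.foldl_cons, List.filter_cons]
    by_cases hv : PySem.Set.contains v x = true
    · rw [if_neg (not_not_intro hv), if_pos hv]
      by_cases hs : PySem.Set.contains s x = true
      · rw [if_pos hs, PySem.Set.update_cons,
          PySem.Set.add_of_mem ((PySem.Set.contains_iff s x).mp hs)]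
        exact ih s
      · rw [if_neg hs, PySem.Set.update_cons,
          ← PySem.Set.add_of_not_mem (fun hm => hs ((PySem.Set.contains_iff s x).mpr hm))]
        exact ih (PySem.Set.add s x)
    · rw [if_pos hv, if_neg (by simpa using hv)]
      exact ih s

-- A's second loop: same shape without the validity guard.
theorem pv_pair2 (l : List Int) (s : PySem.Set Int) :
    l.foldl (fun (st : List Int × PySem.Set Int) cid =>
        if PySem.Set.contains st.2 cid = true then st
        else (st.1 ++ [cid], PySem.Set.add st.2 cid)) (s, s)
      = (PySem.Set.update s l, PySem.Set.update s l) := by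
  induction l generalizing s with
  | nil => rfl
  | cons x tl ih =>
    simp only [List.foldl_cons]
    by_cases hs : PySem.Set.contains s x = true
    · rw [if_pos hs, PySem.Set.update_cons,
        PySem.Set.add_of_mem ((PySem.Set.contains_iff s x).mp hs)]
      exact ih s
    · rw [if_neg hs, PySem.Set.update_cons,
        ← PySem.Set.add_of_not_mem (fun hm => hs ((PySem.Set.contains_iff s x).mpr hm))]
      exact ih (PySem.Set.add s x)

-- B's dict-building loop (guarded first-time insert at value len(dict)): its keys are the
-- ordered dedup of the elements passing p, and each key's value is its index in that dedup.
theorem pv_dictfold (p : Int → Bool) (l : List Int) :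
    (l.foldl (fun d x => if p x && !(d.contains x) then d.insert x ((d.size : Nat) : Int) else d)
        PySem.Dict.empty).keys = PySem.Set.ofList (l.filter p)
    ∧ ∀ x ∈ PySem.Set.ofList (l.filter p),
      (l.foldl (fun d x => if p x && !(d.contains x) then d.insert x ((d.size : Nat) : Int) else d)
          PySem.Dict.empty).getD x 0
        = (((PySem.Set.ofList (l.filter p)).idxOf x : Nat) : Int) := by
  induction l using List.reverseRecOn with
  | nil => exact ⟨rfl, by intro x hx; simp [PySem.Set.ofList] at hx⟩
  | append_singleton tl x ih =>
    obtain ⟨ihk, ihg⟩ := ih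
    simp only [List.foldl_append, List.foldl_cons, List.foldl_nil, List.filter_append,
      List.filter_cons, List.filter_nil]
    by_cases hp : p x = true
    · simp only [hp, Bool.true_and, if_true]
      rw [PySem.Set.ofList_append_singleton]
      by_cases hc : (tl.foldl (fun d x => if p x && !(d.contains x) then d.insert x ((d.size : Nat) : Int) else d)
          PySem.Dict.empty).contains x = true
      · have hxk : x ∈ PySem.Set.ofList (tl.filter p) := by
          rw [← ihk]; exact (PySem.Dict.contains_iff_mem_keys _ x).mp hc
        rw [hc]
        simp only [Bool.not_true]
        rw [if_neg Bool.false_ne_true, PySem.Set.add_of_mem hxk]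
        exact ⟨ihk, ihg⟩
      · have hcf : (tl.foldl (fun d x => if p x && !(d.contains x) then d.insert x ((d.size : Nat) : Int) else d)
            PySem.Dict.empty).contains x = false := by
          rw [← Bool.not_eq_true]; exact hc
        have hxk : x ∉ PySem.Set.ofList (tl.filter p) := by
          rw [← ihk]; exact fun hm => hc ((PySem.Dict.contains_iff_mem_keys _ x).mpr hm)
        rw [hcf]
        simp only [Bool.not_false]
        rw [if_pos trivial, PySem.Set.add_of_not_mem hxk]
        constructor
        · rw [PySem.Dict.keys_insert_of_not_contains _ _ hcf, ihk]
        · intro y hy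
          rw [PySem.Dict.getD_insert]
          rcases List.mem_append.mp hy with hyK | hyx
          · have hyne : y ≠ x := fun he => hxk (he ▸ hyK)
            rw [if_neg hyne, List.idxOf_append_of_mem hyK]
            exact ihg y hyK
          · have hyx : y = x := by simpa using hyx
            subst hyx
            have hsz : (tl.foldl (fun d x => if p x && !(d.contains x) then d.insert x ((d.size : Nat) : Int) else d)
                PySem.Dict.empty).size = (PySem.Set.ofList (tl.filter p)).length := by
              rw [← ihk]; simp [PySem.Dict.keys, PySem.Dict.size]
            rw [if_pos rfl, List.idxOf_append_of_notMem hxk, hsz]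
            simp
    · rw [Bool.not_eq_true] at hp
      simp only [hp, Bool.false_and, Bool.false_eq_true, if_false, List.append_nil]
      exact ⟨ihk, ihg⟩

-- Python's d.setdefault(x, len(d)) is the guarded first-time insert used by pv_dictfold.
theorem pv_setdefault_eq (d : PySem.Dict Int Int) (x : Int) :
    d.setdefault x ((d.size : Nat) : Int)
      = if (fun _ : Int => true) x && !(d.contains x) then d.insert x ((d.size : Nat) : Int) else d := by
  cases h : d.contains x
  · simp [PySem.Dict.setdefault_of_not_contains d _ h]
  · simp [PySem.Dict.setdefault_of_contains d _ h]

-- Boolean negation of Set.contains read as non-membership.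
theorem pv_bnot (S : PySem.Set Int) (x : Int) : (!(PySem.Set.contains S x)) = true ↔ x ∉ S := by
  rw [Bool.not_eq_true', ← PySem.Set.contains_iff]
  simp

-- ===== VERDICT (by name: the statement is the Claim_ definition above) =====
theorem apply_defensive_reorder_py_spec : Claim_equal_apply_defensive_reorder_py := by
  intro haiku_ids candidates _ _
  unfold Spec_apply_defensive_reorder_py apply_defensive_reorder_py apply_defensive_reorder_py_alt
  set cand : List Int := candidates.map pvGetId with hcand
  set valid : PySem.Set Int := PySem.Set.ofList cand with hvalid
  set q : Int → Bool := fun x => PySem.Set.contains valid x with hq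
  set R1 : List Int := PySem.Set.ofList (haiku_ids.filter q) with hR1
  set R2 : List Int := List.filter (fun y => !(PySem.Set.contains R1 y)) valid with hR2
  -- A's value is R1 ++ R2
  have hA : (let st1 := haiku_ids.foldl (fun (st : List Int × PySem.Set Int) hid =>
        if ¬ (PySem.Set.contains valid hid = true) then st
        else if PySem.Set.contains st.2 hid = true then st
        else (st.1 ++ [hid], PySem.Set.add st.2 hid)) ([], PySem.Set.empty)
      let st2 := cand.foldl (fun (st : List Int × PySem.Set Int) cid =>
        if PySem.Set.contains st.2 cid = true then st
        else (st.1 ++ [cid], PySem.Set.add st.2 cid)) st1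
      st2.1) = R1 ++ R2 := by
    show (cand.foldl _ (haiku_ids.foldl _ (([], PySem.Set.empty) : List Int × PySem.Set Int))).1 = R1 ++ R2
    have he : (([], PySem.Set.empty) : List Int × PySem.Set Int) = (PySem.Set.empty, PySem.Set.empty) := rfl
    rw [he, pv_pair1 valid haiku_ids PySem.Set.empty]
    have h0 : PySem.Set.update PySem.Set.empty (haiku_ids.filter q) = R1 :=
      PySem.Set.update_nil_left _
    rw [h0, pv_pair2 cand R1]
    exact PySem.Set.update_eq_append_filter R1 cand
  rw [hA]
  -- B's dicts
  set cr : PySem.Dict Int Int :=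
    candidates.foldl (fun d c => d.setdefault (pvGetId c) (d.size : Int)) PySem.Dict.empty with hcr
  have hcr2 : cr = cand.foldl
      (fun d x => if (fun _ : Int => true) x && !(d.contains x) then d.insert x ((d.size : Nat) : Int) else d)
      PySem.Dict.empty := by
    rw [hcr, hcand, List.foldl_map]
    congr 1
    funext d x
    exact pv_setdefault_eq d (pvGetId x)
  have hcrf := pv_dictfold (fun _ : Int => true) cand
  rw [← hcr2] at hcrf
  have hfT : cand.filter (fun _ : Int => true) = cand := by simp
  rw [hfT] at hcrf
  obtain ⟨hck, hcg⟩ := hcrf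
  -- cr.contains agrees with the validity test q
  have hP : ∀ x, cr.contains x = q x := by
    intro x
    rw [Bool.eq_iff_iff, PySem.Dict.contains_iff_mem_keys, hck, hq, hvalid,
      PySem.Set.contains_iff]
  set hr : PySem.Dict Int Int :=
    haiku_ids.foldl (fun r h =>
      if cr.contains h && !(r.contains h) then r.insert h (r.size : Int) else r)
      PySem.Dict.empty with hhr
  have hhr2 : hr = haiku_ids.foldl
      (fun d x => if (fun y => cr.contains y) x && !(d.contains x) then d.insert x ((d.size : Nat) : Int) else d)
      PySem.Dict.empty := rfl
  have hhrf := pv_dictfold (fun y => cr.contains y) haiku_ids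
  rw [← hhr2] at hhrf
  have hfq : haiku_ids.filter (fun y => cr.contains y) = haiku_ids.filter q :=
    List.filter_congr (fun x _ => hP x)
  rw [hfq] at hhrf
  obtain ⟨hrk, hrg⟩ := hhrf
  rw [← hR1] at hrk hrg
  -- keys coincide with valid = ofList cand
  have hckv : cr.keys = valid := hck
  -- the sort key
  set n : Int := (haiku_ids.length : Int) with hn
  set key : Int → Int := fun x => if hr.contains x = true then hr.getD x 0 else n + cr.getD x 0
    with hkey
  have hQ : ∀ x, hr.contains x = true ↔ x ∈ R1 := by
    intro x; rw [PySem.Dict.contains_iff_mem_keys, hrk]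
  have hsub : ∀ a ∈ R1, a ∈ valid := by
    intro a ha
    rw [hR1, PySem.Set.mem_ofList, List.mem_filter] at ha
    rw [hvalid, PySem.Set.mem_ofList]
    have := ha.2
    rw [hq, PySem.Set.contains_iff, hvalid, PySem.Set.mem_ofList] at this
    exact this
  have hkey1 : ∀ x ∈ R1, key x = ((R1.idxOf x : Nat) : Int) := by
    intro x hx
    rw [hkey]
    simp only [if_pos ((hQ x).mpr hx)]
    exact hrg x hx
  have hkey2 : ∀ x ∈ R2, key x = n + ((valid.idxOf x : Nat) : Int) := by
    intro x hx
    rw [hR2, List.mem_filter] at hx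
    have hx1 : x ∉ R1 := (pv_bnot R1 x).mp hx.2
    simp only [hkey]
    rw [if_neg (fun hc => hx1 ((hQ x).mp hc))]
    congr 1
    exact hcg x hx.1
  have hndR1 : R1.Nodup := by rw [hR1]; exact PySem.Set.nodup_ofList _
  have hndV : valid.Nodup := by rw [hvalid]; exact PySem.Set.nodup_ofList _
  have hndR2 : R2.Nodup := by rw [hR2]; exact hndV.filter _
  have hdisj : ∀ a ∈ R1, a ∉ R2 := by
    intro a ha hb
    rw [hR2, List.mem_filter] at hb
    exact (pv_bnot R1 a).mp hb.2 ha
  have hperm : (R1 ++ R2).Perm cr.keys := by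
    rw [hckv]
    rw [List.perm_ext_iff_of_nodup (List.Nodup.append hndR1 hndR2 hdisj) hndV]
    intro a
    rw [List.mem_append]
    constructor
    · rintro (ha | ha)
      · exact hsub a ha
      · rw [hR2, List.mem_filter] at ha; exact ha.1
    · intro ha
      by_cases h1 : a ∈ R1
      · exact Or.inl h1
      · refine Or.inr ?_
        rw [hR2, List.mem_filter]
        exact ⟨ha, (pv_bnot R1 a).mpr h1⟩
  have hlenR1 : R1.length ≤ haiku_ids.length := by
    rw [hR1]
    exact le_trans (PySem.Set.length_ofList_le _) (List.length_filter_le _ _)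
  have hpw : (R1 ++ R2).Pairwise (fun a b => key a < key b) := by
    rw [List.pairwise_append]
    refine ⟨?_, ?_, ?_⟩
    · refine (pv_idxOf_pairwise R1 hndR1).imp_of_mem ?_
      intro a b ha hb hlt
      rw [hkey1 a ha, hkey1 b hb]
      exact_mod_cast hlt
    · have := (pv_idxOf_pairwise valid hndV).filter (fun y => !(PySem.Set.contains R1 y))
      rw [← hR2] at this
      refine this.imp_of_mem ?_
      intro a b ha hb hlt
      rw [hkey2 a ha, hkey2 b hb]
      have : (valid.idxOf a : Int) < (valid.idxOf b : Int) := by exact_mod_cast hlt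
      omega
    · intro a ha b hb
      rw [hkey1 a ha, hkey2 b hb]
      have h1 : R1.idxOf a < R1.length := List.idxOf_lt_length_of_mem ha
      have h2 : R1.length ≤ haiku_ids.length := hlenR1
      have h3 : (0 : Int) ≤ ((valid.idxOf b : Nat) : Int) := by positivity
      rw [hn]
      omega
  exact (PySem.List.sorted_eq_of_perm_of_pairwise_lt cr.keys (R1 ++ R2) key hperm hpw).symm
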